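-- pv_equiv track=rewrite | github.com/robert-anderson/M7 | python/tmp.py | get_compile_defs
-- ===== SOURCE A (Python) =====
-- def get_compile_defs(lines):
--     d = None
--     for line in lines:
--         if 'compile definitions' in line: d = {}
--         elif 'Input specification' in line: return d
--         if d is None: continue
--         split = line.strip().split('|')
--         if len(split)==4: d[split[1].strip()] = split[2].strip()
-- ===== SOURCE B (Python) =====
-- def get_compile_defs(lines):
--     # locate the terminator: first line mentioning 'Input specification'
--     end = next((i for i, l in enumerate(lines) if 'Input specification' in l), None)
--     if end is None:
--         return None
--     # locate the section start: last 'compile definitions' line before the terminator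
--     start = None
--     for i in range(end):
--         if 'compile definitions' in lines[i]:
--             start = i
--     if start is None:
--         return None
--     # parse the 4-field table rows of that section
--     d = {}
--     for line in lines[start:end]:
--         f = line.strip().split('|')
--         if len(f) == 4:
--             d[f[1].strip()] = f[2].strip()
--     return d
-- ===== Notes on version B (the rewrite author's own statement) =====
-- stated objective: alternative
-- what changed: A is one stateful pass that resets a dict at every 'compile definitions' marker and returns at the terminator; B instead locates the first terminator index and the last marker index before it, then builds the dict in one pass over that slice. Pre_ excludes inputs containing a line with both marker phrases, a corner where treating the line as a section start (A) or as the terminator (B) are equally defensible.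
import Mathlib
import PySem

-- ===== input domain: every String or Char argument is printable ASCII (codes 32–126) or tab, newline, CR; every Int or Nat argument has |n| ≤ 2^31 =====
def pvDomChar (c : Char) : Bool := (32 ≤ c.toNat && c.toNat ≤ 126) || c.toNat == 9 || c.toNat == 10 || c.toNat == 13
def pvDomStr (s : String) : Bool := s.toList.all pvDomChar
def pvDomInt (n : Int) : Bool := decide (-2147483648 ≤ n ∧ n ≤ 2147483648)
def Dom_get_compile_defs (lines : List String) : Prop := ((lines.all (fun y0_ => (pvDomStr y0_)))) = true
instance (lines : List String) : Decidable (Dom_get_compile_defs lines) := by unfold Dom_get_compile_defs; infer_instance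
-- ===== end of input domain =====

-- B replaces A's single stateful pass (dict reset on each marker) by: find the first
-- terminator index, the last marker index before it, and build the dict once over that
-- slice (objective: alternative decomposition, same asymptotic cost).

-- ===== PORT A =====
-- shared with port B: the two marker tests and the one-line row parser both Pythons contain
def cdMark (line : String) : Bool := PySem.Str.isIn "compile definitions" line
def specMark (line : String) : Bool := PySem.Str.isIn "Input specification" line
def updLine (d : PySem.Dict String String) (line : String) : PySem.Dict String String :=
  let split := (PySem.Str.split? (PySem.Str.strip line) "|").getD []
  if split.length == 4 then
    d.insert (PySem.Str.strip (PySem.List.pyGetD split 1 ""))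
             (PySem.Str.strip (PySem.List.pyGetD split 2 ""))
  else d

def goA : List String → Option (PySem.Dict String String) → Option (List (String × String))
  | [], _ => none
  | line :: rest, d =>
    if cdMark line then goA rest (some (updLine PySem.Dict.empty line))
    else if specMark line then d.map (fun dd => dd.items)
    else
      match d with
      | none => goA rest none
      | some dd => goA rest (some (updLine dd line))

def get_compile_defs (lines : List String) : Option (List (String × String)) :=
  goA lines none

-- ===== PORT B =====
-- Source B's 'next((i for i, l in enumerate(lines) if ... in l), None)'
def findEnd : List String → Option Nat
  | [] => none
  | l :: rest => if specMark l then some 0 else (findEnd rest).map (· + 1)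

def get_compile_defs_alt (lines : List String) : Option (List (String × String)) :=
  match findEnd lines with
  | none => none
  | some e =>
    -- 'start = None; for i in range(end): if ... in lines[i]: start = i'
    match (PySem.List.pyRange 0 (e : Int) 1).foldl
        (fun st i => if cdMark (PySem.List.pyGetD lines i "") then some i else st) none with
    | none => none
    | some s =>
      some (((PySem.List.slice lines (some s) (some (e : Int))).foldl
              updLine PySem.Dict.empty).items)

-- ===== PRECONDITION & SPEC =====
-- Pre_ excludes inputs containing a line with both marker phrases, a corner where treating
-- the line as a section start (A's elif order) or as the terminator (B) are equally defensible.
def Pre_get_compile_defs (lines : List String) : Prop :=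
  (lines.all (fun l => !(PySem.Str.isIn "compile definitions" l &&
                         PySem.Str.isIn "Input specification" l))) = true
instance (lines : List String) : Decidable (Pre_get_compile_defs lines) := by
  unfold Pre_get_compile_defs; infer_instance

def pvWitness_get_compile_defs : List String :=
  ["compile definitions", " |a|b| ", "Input specification"]

def Spec_get_compile_defs (lines : List String) (out : Option (List (String × String))) : Prop := out = get_compile_defs_alt lines
instance (lines : List String) (out : Option (List (String × String))) : Decidable (Spec_get_compile_defs lines out) := by unfold Spec_get_compile_defs; infer_instance

-- ===== CLAIM (what is proved, stated in full; the proofs are below) =====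
def Claim_equal_get_compile_defs : Prop := ∀ (lines : List String), Dom_get_compile_defs lines → Pre_get_compile_defs lines → Spec_get_compile_defs lines (get_compile_defs lines)

-- ===== LEMMAS AND PROOFS =====

-- proof-only reformulation of the scan: prefix up to the first 'pure' terminator line
def takeToSpec : List String → Option (List String)
  | [] => none
  | line :: rest =>
    if specMark line && !cdMark line then some []
    else (takeToSpec rest).map (fun p => line :: p)

-- backward scan for the last marker index (proof-only)
def lastMark (pre : List String) : Nat → Option Nat
  | 0 => none
  | n + 1 => if cdMark (PySem.List.pyGetD pre (n : Int) "") then some n else lastMark pre n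

-- one step of A's loop once the dict exists
def stepA (dd : PySem.Dict String String) (line : String) : PySem.Dict String String :=
  if cdMark line then updLine PySem.Dict.empty line else updLine dd line

theorem goA_some (lines : List String) : ∀ dd,
    goA lines (some dd) =
      match takeToSpec lines with
      | none => none
      | some pre => some ((pre.foldl stepA dd).items) := by
  induction lines with
  | nil => intro dd; rfl
  | cons line rest ih =>
    intro dd
    by_cases hc : cdMark line = true
    · simp [goA, takeToSpec, hc, ih]
      cases h : takeToSpec rest <;> simp [stepA, hc]
    · by_cases hs : specMark line = true
      · simp [goA, takeToSpec, hc, hs]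
      · simp [goA, takeToSpec, hc, hs, ih]
        cases h : takeToSpec rest <;> simp [stepA, hc]

theorem stepA_indep (p : List String) (h : p.any cdMark = true) :
    ∀ dd dd', p.foldl stepA dd = p.foldl stepA dd' := by
  induction p with
  | nil => simp at h
  | cons l p ih =>
    intro dd dd'
    by_cases hc : cdMark l = true
    · simp [List.foldl, stepA, hc]
    · simp only [List.any_cons, hc, Bool.false_or] at h
      simp only [List.foldl, stepA, hc]
      exact ih h _ _

theorem goA_none (lines : List String) :
    goA lines none =
      match takeToSpec lines with
      | none => none
      | some pre =>
          if pre.any cdMark then some ((pre.foldl stepA PySem.Dict.empty).items) else none := by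
  induction lines with
  | nil => rfl
  | cons line rest ih =>
    by_cases hc : cdMark line = true
    · simp [goA, takeToSpec, hc, goA_some]
      cases h : takeToSpec rest <;> simp [stepA, hc]
    · by_cases hs : specMark line = true
      · simp [goA, takeToSpec, hc, hs]
      · have hskip : goA (line :: rest) none = goA rest none := by
          simp [goA, hc, hs]
        have htts : takeToSpec (line :: rest) = (takeToSpec rest).map (fun p => line :: p) := by
          simp [takeToSpec, hc, hs]
        rw [hskip, ih, htts]
        cases h : takeToSpec rest with
        | none => rfl
        | some pre =>
          simp only [Option.map_some]
          rw [show ((line :: pre).any cdMark) = pre.any cdMark by simp [hc],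
              List.foldl_cons]
          by_cases ha : pre.any cdMark = true
          · rw [if_pos ha, if_pos ha,
              stepA_indep pre ha PySem.Dict.empty (stepA PySem.Dict.empty line)]
          · rw [if_neg (by simp [ha]), if_neg (by simp [ha])]

theorem lastMark_lt (pre : List String) : ∀ n i, lastMark pre n = some i → i < n := by
  intro n
  induction n with
  | zero => intro i h; simp [lastMark] at h
  | succ m ih =>
    intro i h
    simp only [lastMark] at h
    split at h
    · cases h; omega
    · exact Nat.lt_succ_of_lt (ih i h)

theorem lastMark_append (pre : List String) (x : String) :
    ∀ n, n ≤ pre.length → lastMark (pre ++ [x]) n = lastMark pre n := by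
  intro n
  induction n with
  | zero => intro _; rfl
  | succ m ih =>
    intro hm
    have hlt : m < pre.length := hm
    simp only [lastMark]
    rw [PySem.List.pyGetD_natCast, PySem.List.pyGetD_natCast,
        List.getD_eq_getElem?_getD, List.getD_eq_getElem?_getD,
        List.getElem?_append_left hlt, ih (Nat.le_of_lt hlt)]

theorem lastMark_concat (pre : List String) (x : String) :
    lastMark (pre ++ [x]) (pre.length + 1) =
      if cdMark x then some pre.length else lastMark pre pre.length := by
  simp only [lastMark]
  rw [PySem.List.pyGetD_natCast, List.getD_eq_getElem?_getD, List.getElem?_concat_length,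
      lastMark_append pre x pre.length (le_refl _)]
  rfl

theorem lastMark_none_iff (pre : List String) :
    lastMark pre pre.length = none ↔ pre.any cdMark = false := by
  induction pre using List.reverseRecOn with
  | nil => simp [lastMark]
  | append_singleton p x ih =>
    rw [List.length_append, List.length_singleton, lastMark_concat]
    by_cases hc : cdMark x = true <;> simp [hc, ih]

-- B's value computed from the prefix
def fromPre (pre : List String) : Option (List (String × String)) :=
  match lastMark pre pre.length with
  | none => none
  | some i => some (((pre.drop i).foldl updLine PySem.Dict.empty).items)

theorem fromPre_eq (pre : List String) :
    fromPre pre =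
      if pre.any cdMark then some ((pre.foldl stepA PySem.Dict.empty).items) else none := by
  induction pre using List.reverseRecOn with
  | nil => rfl
  | append_singleton p x ih =>
    unfold fromPre
    rw [List.length_append, List.length_singleton, lastMark_concat]
    by_cases hc : cdMark x = true
    · simp only [hc, if_true]
      have hdrop : (p ++ [x]).drop p.length = [x] := by
        rw [List.drop_append_of_le_length (le_refl _)]; simp
      rw [hdrop]
      simp [List.foldl_append, List.foldl, stepA, hc]
    · rw [if_neg hc]
      cases hlm : lastMark p p.length with
      | none =>
        have := (lastMark_none_iff p).mp hlm
        simp [List.any_append, this, hc]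
      | some i =>
        have hi : i < p.length := lastMark_lt p p.length i hlm
        have hany : p.any cdMark = true := by
          by_contra hno
          simp only [Bool.not_eq_true] at hno
          rw [(lastMark_none_iff p).mpr hno] at hlm; cases hlm
        unfold fromPre at ih
        rw [hlm] at ih
        rw [if_pos hany] at ih
        have hdicts : (p.drop i).foldl updLine PySem.Dict.empty = p.foldl stepA PySem.Dict.empty := by
          have := ih
          simp only [Option.some.injEq] at this
          exact PySem.Dict.ext this
        have hdrop : (p ++ [x]).drop i = p.drop i ++ [x] :=
          List.drop_append_of_le_length (Nat.le_of_lt hi)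
        simp only [List.any_append, hany, Bool.true_or, if_true, hdrop,
          List.foldl_append, List.foldl]
        rw [hdicts]
        simp [stepA, hc]

-- under Pre_, no line carries both marks
theorem pre_no_both {lines : List String} (hp : Pre_get_compile_defs lines) :
    ∀ l ∈ lines, cdMark l = true → specMark l = false := by
  intro l hl hc
  unfold Pre_get_compile_defs at hp
  rw [List.all_eq_true] at hp
  have := hp l hl
  simp only [cdMark, specMark] at *
  cases hs : PySem.Str.isIn "Input specification" l
  · rfl
  · rw [hc, hs] at this; simp at this

theorem findEnd_lt : ∀ (lines : List String) e, findEnd lines = some e → e < lines.length := by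
  intro lines
  induction lines with
  | nil => intro e h; cases h
  | cons l rest ih =>
    intro e h
    simp only [findEnd] at h
    split at h
    · cases h; simp
    · cases hr : findEnd rest with
      | none => rw [hr] at h; cases h
      | some m =>
        rw [hr] at h
        simp only [Option.map_some, Option.some.injEq] at h
        subst h
        simpa [List.length_cons] using Nat.succ_lt_succ (ih m hr)

theorem takeToSpec_findEnd {lines : List String} (hp : Pre_get_compile_defs lines) :
    takeToSpec lines = (findEnd lines).map (fun e => lines.take e) := by
  induction lines with
  | nil => rfl
  | cons l rest ih =>
    have hp' : Pre_get_compile_defs rest := by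
      unfold Pre_get_compile_defs at hp ⊢
      simp only [List.all_cons, Bool.and_eq_true] at hp
      exact hp.2
    by_cases hs : specMark l = true
    · have hc : cdMark l = false := by
        cases hcv : cdMark l
        · rfl
        · rw [pre_no_both hp l (by simp) hcv] at hs; cases hs
      simp [takeToSpec, findEnd, hs, hc]
    · simp only [takeToSpec, findEnd, hs, Bool.false_and]
      rw [ih hp']
      cases h : findEnd rest <;> simp
    
theorem foldStart_lastMark (lines : List String) :
    ∀ e, e ≤ lines.length →
    (PySem.List.pyRange 0 (e : Int) 1).foldl
        (fun st i => if cdMark (PySem.List.pyGetD lines i "") then some i else st) none =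
      (lastMark (lines.take e) e).map (fun n => (n : Int)) := by
  intro e
  induction e with
  | zero => intro _; rfl
  | succ m ih =>
    intro hm
    have hlt : m < lines.length := hm
    have hrange : PySem.List.pyRange 0 ((m + 1 : Nat) : Int) 1 =
        PySem.List.pyRange 0 (m : Int) 1 ++ [(m : Int)] := by
      push_cast
      exact PySem.List.pyRange_one_succ_right (by omega)
    rw [hrange, List.foldl_append, ih (Nat.le_of_lt hlt)]
    have htake : lines.take (m + 1) = lines.take m ++ [lines[m]] :=
      List.take_succ_eq_append_getElem hlt
    rw [htake]
    simp only [lastMark]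
    have hlen : (lines.take m).length = m := List.length_take_of_le (Nat.le_of_lt hlt)
    rw [lastMark_append _ _ m (by omega)]
    have hge : (lines.take m ++ [lines[m]])[m]? = some lines[m] := by
      have h0 : (lines.take m ++ [lines[m]])[(lines.take m).length]? = some lines[m] :=
        List.getElem?_concat_length
      rw [hlen] at h0; exact h0
    have hget : PySem.List.pyGetD (lines.take m ++ [lines[m]]) (m : Int) "" = lines[m] := by
      rw [PySem.List.pyGetD_natCast, List.getD_eq_getElem?_getD, hge]
      rfl
    have hget2 : PySem.List.pyGetD lines (m : Int) "" = lines[m] := by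
      rw [PySem.List.pyGetD_natCast, List.getD_eq_getElem?_getD, List.getElem?_eq_getElem hlt]
      rfl
    rw [hget]
    simp only [List.foldl_cons, List.foldl_nil]
    rw [hget2]
    by_cases hc : cdMark lines[m] = true <;> simp [hc]

theorem alt_fromPre {lines : List String} (hp : Pre_get_compile_defs lines) :
    get_compile_defs_alt lines =
      match takeToSpec lines with
      | none => none
      | some pre => fromPre pre := by
  unfold get_compile_defs_alt
  rw [takeToSpec_findEnd hp]
  cases he : findEnd lines with
  | none => rfl
  | some e =>
    have helt : e < lines.length := findEnd_lt lines e he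
    simp only [Option.map_some]
    rw [foldStart_lastMark lines e (Nat.le_of_lt helt)]
    unfold fromPre
    rw [List.length_take_of_le (Nat.le_of_lt helt)]
    cases hlm : lastMark (lines.take e) e with
    | none => simp
    | some i =>
      have hslice : PySem.List.slice lines (some ((i : Nat) : Int)) (some ((e : Nat) : Int)) =
          (lines.take e).drop i := by
        rw [PySem.List.slice_natCast, List.drop_take]
      simp [hslice]

-- ===== VERDICT (by name: the statement is the Claim_ definition above) =====
theorem get_compile_defs_spec : Claim_equal_get_compile_defs := by
  intro lines _ hp
  unfold Spec_get_compile_defs get_compile_defs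
  rw [goA_none, alt_fromPre hp]
  cases h : takeToSpec lines with
  | none => rfl
  | some pre => simp [fromPre_eq]
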